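-- pv_equiv track=rewrite | github.com/thaReal/MasterChef | codeforces/global_round_10/clock.py | solve
-- ===== SOURCE A (Python) =====
-- def solve(n, k, a):
-- 	if k % 2 == 0:
-- 		m = 2
-- 	else:
-- 		m = 1
--
-- 	for i in range(m):
-- 		mx = max(a)
-- 		a = [mx - x for x in a]
--
-- 	sol = [str(x) for x in a]
-- 	return sol
-- ===== SOURCE B (Python) =====
-- def solve(n, k, a):
--     if k % 2:
--         mx = max(a)
--         return [str(mx - x) for x in a]
--     mn = min(a)
--     return [str(x - mn) for x in a]
-- ===== Notes on version B (the rewrite author's own statement) =====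
-- stated objective: simpler
-- what changed: Branches on k's parity instead of looping m times: odd k returns max(a)-x per element; even k uses the fact that two max-reflections compose to subtracting min(a), so only one extremum and one pass over the list are needed.
import Mathlib
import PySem

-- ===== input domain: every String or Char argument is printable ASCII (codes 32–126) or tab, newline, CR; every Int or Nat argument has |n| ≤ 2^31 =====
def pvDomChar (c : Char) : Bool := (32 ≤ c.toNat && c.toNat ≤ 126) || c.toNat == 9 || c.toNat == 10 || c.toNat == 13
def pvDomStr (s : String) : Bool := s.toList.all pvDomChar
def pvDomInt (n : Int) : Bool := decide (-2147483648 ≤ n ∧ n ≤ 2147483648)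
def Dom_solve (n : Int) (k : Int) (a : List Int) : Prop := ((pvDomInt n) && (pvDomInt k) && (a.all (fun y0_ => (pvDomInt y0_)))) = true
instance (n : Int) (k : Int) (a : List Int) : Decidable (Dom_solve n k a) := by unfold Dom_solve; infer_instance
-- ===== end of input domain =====

-- ===== PORT A =====
-- B applies one max-reflection for odd k and replaces the two reflections of even k
-- by a single subtract-min pass (objective: simpler).
def solve (n : Int) (k : Int) (a : List Int) : List String :=
  let m : Nat := if PySem.Int.mod k 2 == 0 then 2 else 1
  let a' := (List.range m).foldl (fun acc _ =>
      match PySem.List.max? acc (fun x => x) with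
      | none => []   -- max([]) raises ValueError in Python; such inputs are excluded by Pre_solve
      | some mx => acc.map (fun x => mx - x)) a
  a'.map (fun x => PySem.Int.toStr x)

-- ===== PORT B =====
def solve_alt (n : Int) (k : Int) (a : List Int) : List String :=
  if PySem.Int.mod k 2 != 0 then
    match PySem.List.max? a (fun x => x) with
    | none => []   -- max([]) raises ValueError in Python; excluded by Pre_solve
    | some mx => a.map (fun x => PySem.Int.toStr (mx - x))
  else
    match PySem.List.min? a (fun x => x) with
    | none => []
    | some mn => a.map (fun x => PySem.Int.toStr (x - mn))

-- ===== PRECONDITION & SPEC =====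
-- Pre_solve excludes only the empty list, on which Python's max([]) raises ValueError.
def Pre_solve (n : Int) (k : Int) (a : List Int) : Prop := a ≠ []
instance (n : Int) (k : Int) (a : List Int) : Decidable (Pre_solve n k a) := by unfold Pre_solve; infer_instance
def pvWitness_solve : Int × Int × List Int := (3, 4, [1, 2, 3])
def Spec_solve (n : Int) (k : Int) (a : List Int) (out : List String) : Prop := out = solve_alt n k a
instance (n : Int) (k : Int) (a : List Int) (out : List String) : Decidable (Spec_solve n k a out) := by unfold Spec_solve; infer_instance

-- ===== CLAIM (what is proved, stated in full; the proofs are below) =====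
def Claim_equal_solve : Prop := ∀ (n : Int) (k : Int) (a : List Int), Dom_solve n k a → Pre_solve n k a → Spec_solve n k a (solve n k a)

-- ===== LEMMAS AND PROOFS =====
theorem foldl_max_map_sub (t : List Int) (c x : Int) :
    (t.map (fun y => c - y)).foldl max (c - x) = c - t.foldl min x := by
  induction t generalizing x with
  | nil => rfl
  | cons a t ih =>
      simp only [List.map_cons, List.foldl_cons]
      rw [show max (c - x) (c - a) = c - min x a by omega]
      exact ih (min x a)

theorem solve_spec' (n k : Int) (a : List Int) (hp : a ≠ []) :
    solve n k a = solve_alt n k a := by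
  have hm : PySem.Int.mod k 2 = k % 2 := PySem.Int.mod_eq_emod_of_pos (by omega)
  cases a with
  | nil => exact absurd rfl hp
  | cons x t =>
      by_cases h : k % 2 = 0
      · -- even k: two reflections = subtract min
        simp only [solve, solve_alt, hm, h, beq_self_eq_true, if_pos, List.range,
          List.range.loop, List.foldl_cons, List.foldl_nil,
          PySem.List.max?_id_cons, PySem.List.min?_id_cons,
          List.map_cons, foldl_max_map_sub, List.map_map]
        rw [if_neg (by simp)]
        congr 1
        · congr 1; omega
        · exact List.map_congr_left (fun y _ => by
            simp only [Function.comp]; congr 1; omega)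
      · -- odd k: one reflection
        simp only [solve, solve_alt, hm,
          if_neg (by simpa using h : ¬((k % 2 == 0) = true)),
          List.range_one, List.foldl_cons, List.foldl_nil,
          PySem.List.max?_id_cons, List.map_cons, List.map_map]
        rw [if_pos (by simpa using h)]
        exact congrArg₂ List.cons rfl (List.map_congr_left (fun y _ => by
          simp only [Function.comp]))

-- ===== VERDICT (by name: the statement is the Claim_ definition above) =====
theorem solve_spec : Claim_equal_solve := by
  intro n k a _ hp
  exact solve_spec' n k a hp
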